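-- pv_equiv track=rewrite | github.com/nikihowe/matchsticks | game.py | generate_allowed
-- ===== SOURCE A (Python) =====
-- def generate_allowed(num=100):
--   """
--   Generate all allowed moves for layers of length up to num.
--
--   :param num: Up to which size of layer to consider (counts even and odd).
--   :return: A list of allowed moves, in the format (low_idx, high_idx).
--             Position in the list encodes layer size - 1.
--   """
--   all_allowed = []
--   for i in range(1, num + 1):
--     # Define the allowed moves recursively
--     if i == 1:
--       allowed = [(1, 1)]
--     else:
--       allowed = all_allowed[i - 2] + [(j, i) for j in range(1, i + 1)]
--     all_allowed.append(allowed)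
--   return all_allowed
-- ===== SOURCE B (Python) =====
-- def generate_allowed(num=100):
--   """Same result as A: each cumulative layer is built directly with a
--   double comprehension, never referencing previously built layers."""
--   return [[(j, k) for k in range(1, i + 1) for j in range(1, k + 1)]
--           for i in range(1, num + 1)]
-- ===== Notes on version B (the rewrite author's own statement) =====
-- stated objective: simpler
-- what changed: Replaced A's accumulator recurrence (each layer built from the previously stored layer via all_allowed[i-2]) by a direct double comprehension computing each cumulative layer independently from scratch.
import Mathlib
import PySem

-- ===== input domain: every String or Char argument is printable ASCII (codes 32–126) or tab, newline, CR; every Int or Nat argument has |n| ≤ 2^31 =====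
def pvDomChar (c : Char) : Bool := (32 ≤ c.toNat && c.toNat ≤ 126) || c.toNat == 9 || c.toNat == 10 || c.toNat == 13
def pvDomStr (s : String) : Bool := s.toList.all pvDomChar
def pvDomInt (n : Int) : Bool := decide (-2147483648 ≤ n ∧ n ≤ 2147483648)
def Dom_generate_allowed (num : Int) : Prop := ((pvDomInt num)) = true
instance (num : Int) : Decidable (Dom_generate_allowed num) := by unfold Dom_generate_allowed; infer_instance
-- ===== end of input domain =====

-- B builds each cumulative layer directly with a double comprehension instead of A's
-- accumulator recurrence; same values, different decomposition (objective: simpler).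

-- ===== PORT A =====
-- Literal port of A: fold threading the growing list all_allowed; the lookup
-- all_allowed[i-2] is pyGet? (always in range inside the loop; .getD [] is never taken).
def generate_allowed (num : Int) : List (List (Int × Int)) :=
  (PySem.List.pyRange 1 (num + 1) 1).foldl
    (fun all_allowed i =>
      let allowed :=
        if i = 1 then [((1 : Int), (1 : Int))]
        else ((PySem.List.pyGet? all_allowed (i - 2)).getD []) ++
             (PySem.List.pyRange 1 (i + 1) 1).map (fun j => (j, i))
      all_allowed ++ [allowed]) []

-- ===== PORT B =====
def generate_allowed_alt (num : Int) : List (List (Int × Int)) :=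
  (PySem.List.pyRange 1 (num + 1) 1).map (fun i =>
    (PySem.List.pyRange 1 (i + 1) 1).flatMap (fun k =>
      (PySem.List.pyRange 1 (k + 1) 1).map (fun j => (j, k))))

-- ===== PRECONDITION & SPEC =====
def Spec_generate_allowed (num : Int) (out : List (List (Int × Int))) : Prop := out = generate_allowed_alt num
instance (num : Int) (out : List (List (Int × Int))) : Decidable (Spec_generate_allowed num out) := by unfold Spec_generate_allowed; infer_instance

-- ===== CLAIM (what is proved, stated in full; the proofs are below) =====
def Claim_equal_generate_allowed : Prop := ∀ (num : Int), Dom_generate_allowed num → Spec_generate_allowed num (generate_allowed num)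

-- ===== LEMMAS AND PROOFS =====

-- B's layer for size i
def pvLayer (i : Int) : List (Int × Int) :=
  (PySem.List.pyRange 1 (i + 1) 1).flatMap (fun k =>
    (PySem.List.pyRange 1 (k + 1) 1).map (fun j => (j, k)))

-- A's loop body
def pvStep (all_allowed : List (List (Int × Int))) (i : Int) : List (List (Int × Int)) :=
  let allowed :=
    if i = 1 then [((1 : Int), (1 : Int))]
    else ((PySem.List.pyGet? all_allowed (i - 2)).getD []) ++
         (PySem.List.pyRange 1 (i + 1) 1).map (fun j => (j, i))
  all_allowed ++ [allowed]

lemma pvInv (n : Nat) :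
    (PySem.List.pyRange 1 ((n : Int) + 1) 1).foldl pvStep [] =
    (PySem.List.pyRange 1 ((n : Int) + 1) 1).map pvLayer := by
  induction n with
  | zero => simp [PySem.List.pyRange_one_eq_nil]
  | succ n ih =>
    have h1 : (1 : Int) ≤ (n : Int) + 1 := by omega
    have hsplit : PySem.List.pyRange 1 ((↑(n + 1) : Int) + 1) 1 =
        PySem.List.pyRange 1 ((n : Int) + 1) 1 ++ [(n : Int) + 1] := by
      push_cast
      exact PySem.List.pyRange_one_succ_right h1
    rw [hsplit, List.foldl_append, List.map_append, ih, List.foldl_cons, List.foldl_nil]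
    unfold pvStep
    simp only [List.map_cons, List.map_nil, List.append_cancel_left_eq]
    by_cases hn : n = 0
    · subst hn
      simp [pvLayer]
      decide
    · have hne : (n : Int) + 1 ≠ 1 := by
        intro h; apply hn; omega
      rw [if_neg hne]
      have hlen : (PySem.List.pyRange 1 ((n : Int) + 1) 1).length = n := by
        rw [PySem.List.length_pyRange_one]; omega
      have hidx : ((n : Int) + 1 - 2) = ((n - 1 : Nat) : Int) := by
        omega
      have hget : PySem.List.pyGet? ((PySem.List.pyRange 1 ((n : Int) + 1) 1).map pvLayer) ((n : Int) + 1 - 2) =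
          some (pvLayer (n : Int)) := by
        rw [hidx, PySem.List.pyGet?_natCast]
        have hlt : n - 1 < ((PySem.List.pyRange 1 ((n : Int) + 1) 1).map pvLayer).length := by
          simp [hlen]; omega
        rw [List.getElem?_eq_getElem hlt]
        congr 1
        rw [List.getElem_map, PySem.List.getElem_pyRange_one]
        congr 1
        omega
      rw [hget, Option.getD_some]
      unfold pvLayer
      have : PySem.List.pyRange 1 ((n : Int) + 1 + 1) 1 =
          PySem.List.pyRange 1 ((n : Int) + 1) 1 ++ [(n : Int) + 1] :=
        PySem.List.pyRange_one_succ_right h1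
      rw [this, List.flatMap_append]
      simp [this]

-- ===== VERDICT (by name: the statement is the Claim_ definition above) =====
theorem generate_allowed_spec : Claim_equal_generate_allowed := by
  intro num _
  unfold Spec_generate_allowed generate_allowed generate_allowed_alt
  by_cases h : num ≤ 0
  · rw [PySem.List.pyRange_one_eq_nil (by omega)]
    simp
  · have hnum : num = ((num.toNat : Int)) := by omega
    rw [hnum]
    exact pvInv num.toNat
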